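-- pv_equiv track=rewrite | github.com/efs91/carapuce | main.py | get_composition_tour
-- ===== SOURCE A (Python) =====
-- from math import floor
--
-- def get_composition_tour(liste_joueurs, max_joueurs_par_groupe, is_escargot):
--     nb_joueurs = len(liste_joueurs)
--     nb_groupes_pleins = floor(nb_joueurs / max_joueurs_par_groupe)
--     taille_dernier_groupe = nb_joueurs - (nb_groupes_pleins * max_joueurs_par_groupe)
--     nb_groupes = nb_groupes_pleins + (1 if taille_dernier_groupe > 0 else 0)
--
--     groupes = [[] for _ in range(nb_groupes)]
--     while len(liste_joueurs) > 0:  # round-robin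
--         for groupe in groupes:
--             groupe.append(liste_joueurs.pop(0))
--             if len(liste_joueurs) == 0:
--                 break
--         if is_escargot: groupes.reverse()
--     return groupes
-- ===== SOURCE B (Python) =====
-- # One pass over chunks with parity-directed insertion; the per-round list reversal of A is
-- # replaced by arithmetic (round parity + one final reverse). Like A, empties the input list.
-- def get_composition_tour(liste_joueurs, max_joueurs_par_groupe, is_escargot):
--     players = liste_joueurs[:]
--     del liste_joueurs[:]  # A consumes its argument in place; keep that side effect
--     n = len(players)
--     if n == 0:
--         return []
--     g = -(-n // max_joueurs_par_groupe)  # number of groups = ceil(n / max)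
--     groupes = [[] for _ in range(g)]
--     nb_rounds = -(-n // g)
--     for r in range(nb_rounds):
--         chunk = players[r * g:(r + 1) * g]
--         if (not is_escargot) or r % 2 == 0:
--             for p, x in enumerate(chunk):
--                 groupes[p].append(x)
--         else:
--             for p, x in enumerate(chunk):
--                 groupes[g - 1 - p].append(x)
--     if is_escargot and nb_rounds % 2 == 1:
--         groupes.reverse()
--     return groupes
-- ===== Notes on version B (the rewrite author's own statement) =====
-- stated objective: faster
-- what changed: A repeatedly pops the first element (O(n) each) and reverses the whole group list after every round; B makes one indexed pass over g-sized chunks of a copy, inserting each chunk forward or backward by round parity and applying at most one final reverse computed from the round count's parity.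
import Mathlib
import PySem

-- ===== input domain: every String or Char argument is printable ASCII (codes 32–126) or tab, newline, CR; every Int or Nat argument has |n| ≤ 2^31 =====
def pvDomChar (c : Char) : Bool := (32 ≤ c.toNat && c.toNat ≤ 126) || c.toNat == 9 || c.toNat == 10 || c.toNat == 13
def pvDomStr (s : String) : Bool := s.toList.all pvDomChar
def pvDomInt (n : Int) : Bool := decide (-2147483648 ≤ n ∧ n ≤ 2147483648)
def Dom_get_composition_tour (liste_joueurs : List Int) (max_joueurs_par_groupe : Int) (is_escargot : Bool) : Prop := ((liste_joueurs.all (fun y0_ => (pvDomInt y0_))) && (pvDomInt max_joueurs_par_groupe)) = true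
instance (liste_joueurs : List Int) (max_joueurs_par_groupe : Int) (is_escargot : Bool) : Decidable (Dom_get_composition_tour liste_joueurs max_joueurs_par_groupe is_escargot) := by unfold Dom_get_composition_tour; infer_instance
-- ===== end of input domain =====

-- B replaces A's pop(0)/reverse-every-round loop by one indexed pass over chunks with
-- parity-directed insertion and a single computed final reverse (measured faster; A is quadratic).
-- Both Pythons empty the input list in place; the equivalence proved here is about the return value.

-- ===== PORT A =====
-- the inner `for groupe in groupes: groupe.append(liste_joueurs.pop(0)); if empty: break`
def pvAFor : List (List Int) → List Int → List (List Int) × List Int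
  | [], rest => ([], rest)
  | gr :: grs, [] => (gr :: grs, [])   -- unreachable in Python (pop on empty would raise)
  | gr :: grs, x :: xs =>
    if xs.isEmpty then ((gr ++ [x]) :: grs, xs)
    else
      let t := pvAFor grs xs
      ((gr ++ [x]) :: t.1, t.2)

-- the `while len(liste_joueurs) > 0` loop; fuel = initial length (each iteration pops ≥ 1)
def pvAWhile (e : Bool) : Nat → List (List Int) → List Int → List (List Int)
  | _, groupes, [] => groupes
  | 0, groupes, _ :: _ => groupes      -- fuel exhaustion: only reachable when groupes = [] (Python diverges; outside Pre_)
  | fuel+1, groupes, x :: xs =>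
    let t := pvAFor groupes (x :: xs)
    pvAWhile e fuel (if e then t.1.reverse else t.1) t.2

def get_composition_tour (liste_joueurs : List Int) (max_joueurs_par_groupe : Int) (is_escargot : Bool) : List (List Int) :=
  let nb_joueurs : Int := liste_joueurs.length
  let nb_groupes_pleins := PySem.Int.floordiv nb_joueurs max_joueurs_par_groupe  -- floor(nb/max); max = 0 raises in Python (outside Pre_)
  let taille_dernier_groupe := nb_joueurs - nb_groupes_pleins * max_joueurs_par_groupe
  let nb_groupes := nb_groupes_pleins + (if taille_dernier_groupe > 0 then (1 : Int) else 0)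
  let groupes := (List.range nb_groupes.toNat).map (fun _ => ([] : List Int))
  pvAWhile is_escargot liste_joueurs.length groupes liste_joueurs

-- ===== PORT B =====
-- `for p, x in enumerate(chunk): groupes[p].append(x)`
def pvBFwd (A : List (List Int)) (c : List Int) : List (List Int) :=
  (c.zipIdx).foldl (fun A px => A.modify px.2 (fun gr => gr ++ [px.1])) A

-- `for p, x in enumerate(chunk): groupes[g - 1 - p].append(x)`
def pvBRev (g : Nat) (A : List (List Int)) (c : List Int) : List (List Int) :=
  (c.zipIdx).foldl (fun A px => A.modify (g - 1 - px.2) (fun gr => gr ++ [px.1])) A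

def get_composition_tour_alt (liste_joueurs : List Int) (max_joueurs_par_groupe : Int) (is_escargot : Bool) : List (List Int) :=
  let n : Int := liste_joueurs.length
  if n == 0 then []
  else
    let g : Int := -(PySem.Int.floordiv (-n) max_joueurs_par_groupe)   -- ceil(n / max) = -(-n // max)
    let gN := g.toNat
    let groupes := List.replicate gN ([] : List Int)
    let nb_rounds : Int := -(PySem.Int.floordiv (-n) g)
    let groupes := (List.range nb_rounds.toNat).foldl (fun A (r : Nat) =>
        let chunk := PySem.List.slice liste_joueurs (some ((r : Int) * g)) (some (((r : Int) + 1) * g))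
        if !is_escargot || r % 2 == 0 then pvBFwd A chunk else pvBRev gN A chunk) groupes
    if is_escargot && PySem.Int.mod nb_rounds 2 == 1 then groupes.reverse else groupes

-- ===== PRECONDITION & SPEC =====
-- Pre_ excludes only inputs on which the Python A does not return: max = 0 (ZeroDivisionError)
-- and max < 0 with a nonempty list (zero groups are built and the while loop never terminates).
def Pre_get_composition_tour (liste_joueurs : List Int) (max_joueurs_par_groupe : Int) (is_escargot : Bool) : Prop :=
  0 < max_joueurs_par_groupe ∨ (liste_joueurs = [] ∧ max_joueurs_par_groupe ≠ 0)
instance (liste_joueurs : List Int) (max_joueurs_par_groupe : Int) (is_escargot : Bool) : Decidable (Pre_get_composition_tour liste_joueurs max_joueurs_par_groupe is_escargot) := by unfold Pre_get_composition_tour; infer_instance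
def pvWitness_get_composition_tour : List Int × Int × Bool := ([1, 2, 3, 4, 5], 2, true)

def Spec_get_composition_tour (liste_joueurs : List Int) (max_joueurs_par_groupe : Int) (is_escargot : Bool) (out : List (List Int)) : Prop := out = get_composition_tour_alt liste_joueurs max_joueurs_par_groupe is_escargot
instance (liste_joueurs : List Int) (max_joueurs_par_groupe : Int) (is_escargot : Bool) (out : List (List Int)) : Decidable (Spec_get_composition_tour liste_joueurs max_joueurs_par_groupe is_escargot out) := by unfold Spec_get_composition_tour; infer_instance

-- ===== CLAIM (what is proved, stated in full; the proofs are below) =====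
def Claim_equal_get_composition_tour : Prop := ∀ (liste_joueurs : List Int) (max_joueurs_par_groupe : Int) (is_escargot : Bool), Dom_get_composition_tour liste_joueurs max_joueurs_par_groupe is_escargot → Pre_get_composition_tour liste_joueurs max_joueurs_par_groupe is_escargot → Spec_get_composition_tour liste_joueurs max_joueurs_par_groupe is_escargot (get_composition_tour liste_joueurs max_joueurs_par_groupe is_escargot)

-- ===== LEMMAS AND PROOFS =====

-- append the chunk elements to the leading groups, one per group
def zipA : List (List Int) → List Int → List (List Int)
  | gs, [] => gs
  | [], _ :: _ => []
  | gr :: grs, x :: xs => (gr ++ [x]) :: zipA grs xs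

-- the same, filling groups back-to-front
def snakeA (A : List (List Int)) (c : List Int) : List (List Int) := (zipA A.reverse c).reverse

-- chunked round-robin with alternating direction (chunk size g1+1)
def altA (g1 : Nat) : Bool → List (List Int) → List Int → List (List Int)
  | _, A, [] => A
  | par, A, x :: xs =>
    altA g1 (!par) (if par then snakeA A ((x :: xs).take (g1+1)) else zipA A ((x :: xs).take (g1+1))) ((x :: xs).drop (g1+1))
termination_by _ _ ps => ps.length
decreasing_by simp

-- chunked round-robin, always forward (chunk size g1+1)
def fwdA (g1 : Nat) : List (List Int) → List Int → List (List Int)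
  | A, [] => A
  | A, x :: xs => fwdA g1 (zipA A ((x :: xs).take (g1+1))) ((x :: xs).drop (g1+1))
termination_by _ ps => ps.length
decreasing_by simp

def pvCeil (n g : Nat) : Nat := (n + g - 1) / g

def revIf (k : Nat) (A : List (List Int)) : List (List Int) := if k % 2 = 1 then A.reverse else A

theorem altA_nil (g1 : Nat) (par : Bool) (A : List (List Int)) : altA g1 par A [] = A := by
  rw [altA.eq_def]

theorem altA_cons (g1 : Nat) (par : Bool) (A : List (List Int)) (x : Int) (xs : List Int) :
    altA g1 par A (x :: xs) = altA g1 (!par)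
      (if par then snakeA A ((x :: xs).take (g1+1)) else zipA A ((x :: xs).take (g1+1)))
      ((x :: xs).drop (g1+1)) := by
  rw [altA.eq_def]

theorem fwdA_nil (g1 : Nat) (A : List (List Int)) : fwdA g1 A [] = A := by
  rw [fwdA.eq_def]

theorem fwdA_cons (g1 : Nat) (A : List (List Int)) (x : Int) (xs : List Int) :
    fwdA g1 A (x :: xs) = fwdA g1 (zipA A ((x :: xs).take (g1+1))) ((x :: xs).drop (g1+1)) := by
  rw [fwdA.eq_def]

theorem zipA_nil (gs : List (List Int)) : zipA gs [] = gs := by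
  cases gs <;> rfl

theorem zipA_length (A : List (List Int)) (c : List Int) : (zipA A c).length = A.length := by
  induction A generalizing c with
  | nil => cases c <;> simp [zipA]
  | cons gr grs ih => cases c <;> simp [zipA, ih]

theorem snakeA_length (A : List (List Int)) (c : List Int) : (snakeA A c).length = A.length := by
  simp [snakeA, zipA_length]

theorem snakeA_nil (A : List (List Int)) : snakeA A [] = A := by
  simp [snakeA, zipA_nil]

theorem pvAFor_eq (gs : List (List Int)) (xs : List Int) :
    pvAFor gs xs = (zipA gs (xs.take gs.length), xs.drop gs.length) := by
  induction gs generalizing xs with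
  | nil => cases xs <;> simp [pvAFor, zipA]
  | cons gr grs ih =>
    cases xs with
    | nil => simp [pvAFor, zipA_nil]
    | cons x xs' =>
      cases xs' with
      | nil => simp [pvAFor, zipA, zipA_nil]
      | cons y ys => simp [pvAFor, ih, zipA]

theorem altA_mirror (g1 : Nat) : ∀ (n : Nat) (ps : List Int) (A : List (List Int)), ps.length ≤ n →
    altA g1 true A ps = (altA g1 false A.reverse ps).reverse := by
  intro n
  induction n with
  | zero =>
    intro ps A h
    have hps : ps = [] := List.eq_nil_of_length_eq_zero (by omega)
    subst hps; simp [altA_nil]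
  | succ n ih =>
    intro ps A h
    cases ps with
    | nil => simp [altA_nil]
    | cons x xs =>
      rw [altA_cons, altA_cons]
      simp only [Bool.not_true, Bool.not_false, if_neg (by simp : ¬ (false = true))]
      rw [ih _ (zipA A.reverse ((x :: xs).take (g1+1))) (by simp only [List.length_drop, List.length_cons] at *; omega), List.reverse_reverse]
      rfl

theorem revIf_succ (k : Nat) (A : List (List Int)) : revIf (k+1) A = revIf k A.reverse := by
  rcases Nat.mod_two_eq_zero_or_one k with h | h <;> simp [revIf, Nat.add_mod, h]

theorem pvCeil_zero (g : Nat) (hg : 0 < g) : pvCeil 0 g = 0 := by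
  unfold pvCeil; exact Nat.div_eq_of_lt (by omega)

theorem pvCeil_succ {n g : Nat} (hn : 0 < n) (hg : 0 < g) :
    pvCeil n g = pvCeil (n - g) g + 1 := by
  unfold pvCeil
  by_cases h : n ≤ g
  · have h1 : n - g = 0 := by omega
    rw [h1]
    have h2 : (n + g - 1) / g = 1 := Nat.div_eq_of_lt_le (by omega) (by omega)
    have h3 : (0 + g - 1) / g = 0 := Nat.div_eq_of_lt (by omega)
    omega
  · rw [show n + g - 1 = (n - 1) + g by omega, Nat.add_div_right _ hg,
      show n - g + g - 1 = n - 1 by omega]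

theorem pvAWhile_false_eq (g1 : Nat) : ∀ (fuel : Nat) (ps : List Int) (A : List (List Int)),
    A.length = g1 + 1 → ps.length ≤ fuel → pvAWhile false fuel A ps = fwdA g1 A ps := by
  intro fuel
  induction fuel with
  | zero =>
    intro ps A _ h
    have hps : ps = [] := List.eq_nil_of_length_eq_zero (by omega)
    subst hps; simp [pvAWhile, fwdA_nil]
  | succ f ih =>
    intro ps A hA h
    cases ps with
    | nil => simp [pvAWhile, fwdA_nil]
    | cons x xs =>
      rw [pvAWhile, fwdA_cons]
      simp only [pvAFor_eq, hA, Bool.false_eq_true, if_false]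
      exact ih _ _ (by rw [zipA_length, hA]) (by simp only [List.length_drop, List.length_cons] at *; omega)

theorem pvAWhile_true_eq (g1 : Nat) : ∀ (fuel : Nat) (ps : List Int) (A : List (List Int)),
    A.length = g1 + 1 → ps.length ≤ fuel →
    pvAWhile true fuel A ps = revIf (pvCeil ps.length (g1+1)) (altA g1 false A ps) := by
  intro fuel
  induction fuel with
  | zero =>
    intro ps A _ h
    have hps : ps = [] := List.eq_nil_of_length_eq_zero (by omega)
    subst hps
    simp [pvAWhile, altA_nil, revIf, pvCeil_zero (g1+1) (by omega)]
  | succ f ih =>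
    intro ps A hA h
    cases ps with
    | nil => simp [pvAWhile, altA_nil, revIf, pvCeil_zero (g1+1) (by omega)]
    | cons x xs =>
      rw [pvAWhile]
      simp only [pvAFor_eq, hA, if_true]
      rw [ih _ _ (by simp [zipA_length, hA]) (by simp only [List.length_drop, List.length_cons] at *; omega)]
      have hmir : altA g1 false (zipA A ((x :: xs).take (g1+1))).reverse ((x :: xs).drop (g1+1))
          = (altA g1 true (zipA A ((x :: xs).take (g1+1))) ((x :: xs).drop (g1+1))).reverse := by
        rw [altA_mirror g1 ((x :: xs).drop (g1+1)).length _ _ le_rfl, List.reverse_reverse]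
      rw [hmir, ← revIf_succ]
      have hlen : pvCeil (x :: xs).length (g1+1) = pvCeil ((x :: xs).drop (g1+1)).length (g1+1) + 1 := by
        rw [List.length_drop]; exact pvCeil_succ (by simp) (by omega)
      rw [hlen]
      congr 1
      rw [altA_cons]
      simp

-- ---- B-side folds ----

theorem bfwd_noop : ∀ (c : List Int) (k : Nat) (A : List (List Int)), A.length ≤ k →
    (c.zipIdx k).foldl (fun A px => A.modify px.2 (fun gr => gr ++ [px.1])) A = A := by
  intro c
  induction c with
  | nil => intro k A _; simp
  | cons x c' ih =>
    intro k A h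
    rw [List.zipIdx_cons, List.foldl_cons]
    have hm : A.modify k (fun gr => gr ++ [x]) = A := by
      apply List.ext_getElem (by simp)
      intro i h1 h2
      rw [List.getElem_modify]
      have : ¬ k = i := by simp at h1; omega
      simp [this]
    rw [hm]; exact ih (k+1) A (by omega)

theorem modify_boundary : ∀ (A1 : List (List Int)) (a : List Int) (A2 : List (List Int)) (f : List Int → List Int),
    (A1 ++ a :: A2).modify A1.length f = A1 ++ f a :: A2 := by
  intro A1
  induction A1 with
  | nil => intro a A2 f; simp [List.modify_zero_cons]
  | cons b A1' ih =>
    intro a A2 f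
    simp only [List.cons_append, List.length_cons, List.modify_succ_cons, ih]

theorem bfwd_aux : ∀ (c : List Int) (k : Nat) (A1 A2 : List (List Int)), A1.length = k →
    ((c.zipIdx k).foldl (fun A px => A.modify px.2 (fun gr => gr ++ [px.1])) (A1 ++ A2)) = A1 ++ zipA A2 c := by
  intro c
  induction c with
  | nil => intro k A1 A2 _; simp [zipA_nil]
  | cons x c' ih =>
    intro k A1 A2 hk
    rw [List.zipIdx_cons, List.foldl_cons]
    cases A2 with
    | nil =>
      have hmod : (A1 ++ ([] : List (List Int))).modify k (fun gr => gr ++ [x]) = A1 := by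
        apply List.ext_getElem (by simp)
        intro i h1 h2
        rw [List.getElem_modify]
        have : ¬ k = i := by simp at h1; omega
        simp [this]
      rw [hmod, bfwd_noop c' (k+1) A1 (by omega)]
      simp [zipA]
    | cons a A2' =>
      rw [← hk, modify_boundary]
      have hsplit : A1 ++ (a ++ [x]) :: A2' = (A1 ++ [a ++ [x]]) ++ A2' := by simp
      rw [hsplit, ih (A1.length + 1) (A1 ++ [a ++ [x]]) A2' (by simp)]
      simp [zipA]

theorem bfwd_eq (A : List (List Int)) (c : List Int) : pvBFwd A c = zipA A c := by
  have := bfwd_aux c 0 [] A rfl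
  simpa [pvBFwd] using this

theorem modify_rev (A : List (List Int)) (f : List Int → List Int) (p : Nat) (hp : p < A.length) :
    A.modify (A.length - 1 - p) f = (A.reverse.modify p f).reverse := by
  apply List.ext_getElem (by simp)
  intro i h1 h2
  have h3 : i < A.length := by simpa using h1
  rw [List.getElem_modify, List.getElem_reverse, List.getElem_modify]
  simp only [List.length_modify, List.length_reverse]
  by_cases hip : i = A.length - 1 - p
  · rw [if_pos (by omega), if_pos (by omega), List.getElem_reverse]
    have hidx : A.length - 1 - (A.length - 1 - i) = i := by omega
    simp only [hidx]
  · rw [if_neg (by omega), if_neg (by omega), List.getElem_reverse]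
    have hidx : A.length - 1 - (A.length - 1 - i) = i := by omega
    simp only [hidx]

theorem brev_aux (g : Nat) : ∀ (c : List Int) (k : Nat) (A : List (List Int)), A.length = g → k + c.length ≤ g →
    ((c.zipIdx k).foldl (fun A px => A.modify (g - 1 - px.2) (fun gr => gr ++ [px.1])) A)
    = ((c.zipIdx k).foldl (fun A px => A.modify px.2 (fun gr => gr ++ [px.1])) A.reverse).reverse := by
  intro c
  induction c with
  | nil => intro k A _ _; simp
  | cons x c' ih =>
    intro k A hA hk
    rw [List.zipIdx_cons, List.foldl_cons, List.foldl_cons]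
    have hkg : k < g := by simp at hk; omega
    have hmod : A.modify (g - 1 - k) (fun gr => gr ++ [x]) = (A.reverse.modify k (fun gr => gr ++ [x])).reverse := by
      rw [← hA]; exact modify_rev A _ k (by omega)
    rw [hmod, ih (k+1) _ (by simp [hA]) (by simp at hk ⊢; omega)]
    simp

theorem brev_eq (g : Nat) (A : List (List Int)) (c : List Int) (hA : A.length = g) (hc : c.length ≤ g) :
    pvBRev g A c = snakeA A c := by
  unfold pvBRev snakeA
  rw [brev_aux g c 0 A hA (by omega)]
  congr 1
  have := bfwd_aux c 0 [] A.reverse rfl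
  simpa [pvBFwd] using this

-- ---- outer fold of B = chunked recursion ----

theorem chunk_slice (l : List Int) (r gN : Nat) :
    PySem.List.slice l (some ((r : Int) * (gN : Int))) (some (((r : Int) + 1) * (gN : Int)))
    = (l.drop (r * gN)).take gN := by
  have h1 : ((r : Int) * (gN : Int)) = ((r * gN : Nat) : Int) := by push_cast; ring
  have h2 : (((r : Int) + 1) * (gN : Int)) = ((r * gN : Nat) : Int) + ((gN : Nat) : Int) := by push_cast; ring
  rw [h1, h2, PySem.List.slice_natCast_add]

theorem parity_flip (r : Nat) : decide ((r+1) % 2 = 1) = !decide (r % 2 = 1) := by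
  rcases Nat.mod_two_eq_zero_or_one r with h | h <;> simp [Nat.add_mod, h]

theorem bouter_true (g1 : Nat) (l : List Int) : ∀ (d r0 : Nat) (A : List (List Int)), A.length = g1 + 1 →
    l.length ≤ (r0 + d) * (g1 + 1) →
    ((List.range' r0 d).foldl (fun A (r : Nat) =>
      let chunk := PySem.List.slice l (some ((r : Int) * ((g1 + 1 : Nat) : Int))) (some (((r : Int) + 1) * ((g1 + 1 : Nat) : Int)))
      if !true || r % 2 == 0 then pvBFwd A chunk else pvBRev (g1+1) A chunk) A)
    = altA g1 (decide (r0 % 2 = 1)) A (l.drop (r0 * (g1 + 1))) := by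
  intro d
  induction d with
  | zero =>
    intro r0 A hA h
    rw [List.drop_eq_nil_of_le (by omega)]
    simp [altA_nil]
  | succ d ih =>
    intro r0 A hA h
    simp only [chunk_slice, Bool.not_true, Bool.false_or] at ih ⊢
    rw [List.range'_succ, List.foldl_cons]
    have hclen : ((l.drop (r0 * (g1+1))).take (g1+1)).length ≤ g1 + 1 := by
      simp [List.length_take]
    have hstep : (if (r0 % 2 == 0 : Bool) then pvBFwd A ((l.drop (r0 * (g1+1))).take (g1+1))
        else pvBRev (g1+1) A ((l.drop (r0 * (g1+1))).take (g1+1)))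
        = (if decide (r0 % 2 = 1) then snakeA A ((l.drop (r0 * (g1+1))).take (g1+1))
           else zipA A ((l.drop (r0 * (g1+1))).take (g1+1))) := by
      rcases Nat.mod_two_eq_zero_or_one r0 with hpar | hpar
      · simp [hpar, bfwd_eq]
      · simp only [hpar]
        norm_num
        exact brev_eq (g1+1) A _ hA hclen
    rw [hstep]
    have hA'len : (if decide (r0 % 2 = 1) then snakeA A ((l.drop (r0 * (g1+1))).take (g1+1))
           else zipA A ((l.drop (r0 * (g1+1))).take (g1+1))).length = g1 + 1 := by
      split_ifs <;> simp [snakeA_length, zipA_length, hA]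
    rw [ih (r0+1) _ hA'len (by rw [show r0+1+d = r0+(d+1) by omega]; exact h)]
    cases hps : l.drop (r0 * (g1+1)) with
    | nil =>
      have hdropnil : l.drop ((r0+1) * (g1+1)) = [] := by
        apply List.drop_eq_nil_of_le
        have := List.drop_eq_nil_iff.mp hps
        have hle : (r0) * (g1+1) ≤ (r0+1) * (g1+1) := by
          apply Nat.mul_le_mul_right; omega
        omega
      rw [hdropnil]
      rw [altA_nil, altA_nil]
      split_ifs <;> simp [snakeA_nil, zipA_nil]
    | cons y ys =>
      conv_rhs => rw [altA_cons]
      have hdrop : (y :: ys).drop (g1+1) = l.drop ((r0+1) * (g1+1)) := by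
        rw [← hps, List.drop_drop]
        congr 1; ring
      have htake : (y :: ys).take (g1+1) = (l.drop (r0 * (g1+1))).take (g1+1) := by rw [hps]
      rw [htake, hdrop, parity_flip]

theorem bouter_false (g1 : Nat) (l : List Int) : ∀ (d r0 : Nat) (A : List (List Int)), A.length = g1 + 1 →
    l.length ≤ (r0 + d) * (g1 + 1) →
    ((List.range' r0 d).foldl (fun A (r : Nat) =>
      let chunk := PySem.List.slice l (some ((r : Int) * ((g1 + 1 : Nat) : Int))) (some (((r : Int) + 1) * ((g1 + 1 : Nat) : Int)))
      if !false || r % 2 == 0 then pvBFwd A chunk else pvBRev (g1+1) A chunk) A)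
    = fwdA g1 A (l.drop (r0 * (g1 + 1))) := by
  intro d
  induction d with
  | zero =>
    intro r0 A hA h
    rw [List.drop_eq_nil_of_le (by omega)]
    simp [fwdA_nil]
  | succ d ih =>
    intro r0 A hA h
    simp only [chunk_slice, Bool.not_false, Bool.true_or, if_true] at ih ⊢
    rw [List.range'_succ, List.foldl_cons, bfwd_eq]
    rw [ih (r0+1) _ (by rw [zipA_length, hA]) (by rw [show r0+1+d = r0+(d+1) by omega]; exact h)]
    cases hps : l.drop (r0 * (g1+1)) with
    | nil =>
      have hdropnil : l.drop ((r0+1) * (g1+1)) = [] := by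
        apply List.drop_eq_nil_of_le
        have := List.drop_eq_nil_iff.mp hps
        have hle : (r0) * (g1+1) ≤ (r0+1) * (g1+1) := by
          apply Nat.mul_le_mul_right; omega
        omega
      rw [hdropnil]
      simp [fwdA_nil, zipA_nil]
    | cons y ys =>
      conv_rhs => rw [fwdA_cons]
      have hdrop : (y :: ys).drop (g1+1) = l.drop ((r0+1) * (g1+1)) := by
        rw [← hps, List.drop_drop]
        congr 1; ring
      have htake : (y :: ys).take (g1+1) = (l.drop (r0 * (g1+1))).take (g1+1) := by rw [hps]
      rw [htake, hdrop]

-- ---- arithmetic ----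

theorem ceil_eq_floor_add {n m : Int} (hm : 0 < m) :
    PySem.Int.floordiv n m + (if 0 < n - PySem.Int.floordiv n m * m then (1 : Int) else 0)
    = -(PySem.Int.floordiv (-n) m) := by
  obtain ⟨h1, h2⟩ := (PySem.Int.floordiv_eq_iff_of_pos hm (q := PySem.Int.floordiv n m)).mp rfl
  rw [eq_comm, PySem.Int.neg_floordiv_neg_eq_iff_of_pos hm]
  split_ifs with hc
  · constructor
    · nlinarith
    · nlinarith
  · push_neg at hc
    constructor
    · nlinarith
    · nlinarith

theorem ceil_pos {n m : Int} (hm : 0 < m) (hn : 0 < n) : 0 < -(PySem.Int.floordiv (-n) m) := by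
  obtain ⟨h1, h2⟩ := (PySem.Int.neg_floordiv_neg_eq_iff_of_pos hm (q := -(PySem.Int.floordiv (-n) m))).mp rfl
  nlinarith

theorem ceil_toNat {nN gN : Nat} (hn : 0 < nN) (hg : 0 < gN) :
    (-(PySem.Int.floordiv (-(nN : Int)) (gN : Int))).toNat = pvCeil nN gN := by
  have hgi : (0 : Int) < (gN : Int) := by exact_mod_cast hg
  obtain ⟨h1, h2⟩ := (PySem.Int.neg_floordiv_neg_eq_iff_of_pos hgi
    (q := -(PySem.Int.floordiv (-(nN : Int)) (gN : Int)))).mp rfl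
  set R : Int := -(PySem.Int.floordiv (-(nN : Int)) (gN : Int)) with hR
  have hRpos : 0 < R := ceil_pos hgi (by exact_mod_cast hn)
  set RN : Nat := R.toNat with hRN
  have hcast : R = (RN : Int) := by omega
  rw [hcast] at h1 h2
  have h1n : RN * gN - gN < nN := by
    have : ((RN : Int) - 1) * gN = (RN : Int) * gN - gN := by ring
    rw [this] at h1
    have hx : (RN : Int) * (gN : Int) = ((RN * gN : Nat) : Int) := by push_cast; ring
    rw [hx] at h1
    omega
  have h2n : nN ≤ RN * gN := by
    have hx : (RN : Int) * (gN : Int) = ((RN * gN : Nat) : Int) := by push_cast; ring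
    rw [hx] at h2
    omega
  show RN = pvCeil nN gN
  unfold pvCeil
  rw [eq_comm]
  apply Nat.div_eq_of_lt_le
  · have e1 : RN * gN ≤ nN + gN - 1 := by omega
    exact e1
  · have e2 : (RN + 1) * gN = RN * gN + gN := by ring
    rw [e2]; omega

theorem map_range_const (n : Nat) : (List.range n).map (fun _ => ([] : List Int)) = List.replicate n ([] : List Int) := by
  apply List.ext_getElem (by simp)
  intro i h1 h2
  simp

theorem pvCeil_mul_ge {n g : Nat} (hg : 0 < g) : n ≤ pvCeil n g * g := by
  unfold pvCeil
  have h1 := Nat.div_add_mod (n + g - 1) g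
  have h2 : (n + g - 1) % g < g := Nat.mod_lt _ hg
  rw [Nat.mul_comm] at h1
  set q := (n + g - 1) / g with hq
  set r := (n + g - 1) % g with hr
  set t := q * g with ht
  omega

-- the heart of the equivalence, split by the escargot flag, for a nonempty list
theorem main_nonempty (l : List Int) (m : Int) (e : Bool) (hl : l ≠ []) (hm : 0 < m) :
    get_composition_tour l m e = get_composition_tour_alt l m e := by
  have hnpos : 0 < l.length := List.length_pos_of_ne_nil hl
  have hnI : (0 : Int) < (l.length : Int) := by exact_mod_cast hnpos
  have hceil := ceil_eq_floor_add (n := (l.length : Int)) hm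
  have hgpos : (0 : Int) < -(PySem.Int.floordiv (-(l.length : Int)) m) := ceil_pos hm hnI
  set g : Int := -(PySem.Int.floordiv (-(l.length : Int)) m) with hgdef
  set gN : Nat := g.toNat with hgNdef
  have hgcast : g = (gN : Int) := by omega
  have hgN : 0 < gN := by omega
  obtain ⟨g1, hg1⟩ : ∃ g1, gN = g1 + 1 := ⟨gN - 1, by omega⟩
  have hRN : (-(PySem.Int.floordiv (-(l.length : Int)) g)).toNat = pvCeil l.length gN := by
    rw [hgcast]; exact ceil_toNat hnpos hgN
  have hRpos : (0:Int) < -(PySem.Int.floordiv (-(l.length : Int)) g) := ceil_pos (by omega) hnI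
  have hRcast : -(PySem.Int.floordiv (-(l.length : Int)) g) = ((pvCeil l.length gN : Nat) : Int) := by
    omega
  have hbound : l.length ≤ (0 + (pvCeil l.length gN)) * (g1 + 1) := by
    rw [Nat.zero_add, ← hg1]
    exact pvCeil_mul_ge hgN
  -- A side
  have hA : get_composition_tour l m e
      = pvAWhile e l.length (List.replicate gN ([] : List Int)) l := by
    simp only [get_composition_tour, hceil, ← hgNdef, map_range_const]
  have hrepl : (List.replicate gN ([] : List Int)).length = g1 + 1 := by simp [hg1]
  -- B side: unfold and normalise the alt port
  rw [hA]
  simp only [get_composition_tour_alt]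
  rw [if_neg (by simp; omega)]
  rw [← hgdef, ← hgNdef, hRcast, hgcast, Int.toNat_natCast, List.range_eq_range']
  cases e with
  | false =>
    rw [pvAWhile_false_eq g1 l.length l (List.replicate gN []) hrepl le_rfl]
    rw [if_neg (by simp : ¬ ((false && PySem.Int.mod ((pvCeil l.length gN : Nat) : Int) 2 == 1) = true))]
    rw [hg1]
    rw [bouter_false g1 l (pvCeil l.length (g1+1)) 0 (List.replicate (g1+1) []) (by simp) (by rw [← hg1]; rw [← hg1] at hbound; exact hbound)]
    simp [← hg1]
  | true =>
    rw [pvAWhile_true_eq g1 l.length l (List.replicate gN []) hrepl le_rfl]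
    rw [hg1]
    rw [bouter_true g1 l (pvCeil l.length (g1+1)) 0 (List.replicate (g1+1) []) (by simp) (by rw [← hg1]; rw [← hg1] at hbound; exact hbound)]
    simp only [Nat.zero_mod]
    have hmodc : (PySem.Int.mod ((pvCeil l.length (g1+1) : Nat) : Int) 2 == 1)
        = decide (pvCeil l.length (g1+1) % 2 = 1) := by
      rw [show (2 : Int) = ((2 : Nat) : Int) by norm_num, PySem.Int.mod_natCast]
      rcases Nat.mod_two_eq_zero_or_one (pvCeil l.length (g1+1)) with h | h <;> simp [h]
    rw [hmodc]
    unfold revIf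
    rw [← hg1]
    rcases Nat.mod_two_eq_zero_or_one (pvCeil l.length gN) with h | h <;> simp [h]

-- ===== VERDICT (by name: the statement is the Claim_ definition above) =====
theorem get_composition_tour_spec : Claim_equal_get_composition_tour := by
  intro l m e _ hpre
  unfold Spec_get_composition_tour
  cases l with
  | nil =>
    have hm : m ≠ 0 := by rcases hpre with h | ⟨_, h⟩ <;> omega
    simp [get_composition_tour, get_composition_tour_alt, pvAWhile, PySem.Int.floordiv]
  | cons x xs =>
    have hm : 0 < m := by
      rcases hpre with h | ⟨h, _⟩
      · exact h
      · exact absurd h (by simp)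
    exact main_nonempty (x :: xs) m e (by simp) hm
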